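-- pv_equiv track=rewrite | github.com/AlexZander-666/PhyCL_Net | code/scripts/run_cross_dataset_evaluation.py | resolve_target_datasets
-- ===== SOURCE A (Python) =====
-- from typing import Dict, List, Optional, Sequence, Tuple
--
-- SUPPORTED_DATASETS = ("sisfall", "mobiact", "unimib", "kfall")
--
-- def resolve_target_datasets(base_dataset: str, requested: Optional[Sequence[str]] = None) -> List[str]:
--     base = str(base_dataset).lower()
--     if base not in SUPPORTED_DATASETS:
--         raise ValueError(f"Unsupported base dataset: {base_dataset}")
--
--     source = requested if requested else SUPPORTED_DATASETS
--     targets: List[str] = []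
--     seen = set()
--     for name in source:
--         dataset = str(name).lower()
--         if dataset not in SUPPORTED_DATASETS:
--             raise ValueError(f"Unsupported target dataset: {name}")
--         if dataset == base or dataset in seen:
--             continue
--         seen.add(dataset)
--         targets.append(dataset)
--     return targets
-- ===== SOURCE B (Python) =====
-- SUPPORTED_DATASETS = ("sisfall", "mobiact", "unimib", "kfall")
--
--
-- def resolve_target_datasets(base_dataset, requested=None):
--     base = str(base_dataset).lower()
--     if base not in SUPPORTED_DATASETS:
--         raise ValueError(f"Unsupported base dataset: {base_dataset}")
--     source = requested if requested else SUPPORTED_DATASETS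
--     lows = []
--     for name in source:
--         low = str(name).lower()
--         if low not in SUPPORTED_DATASETS:
--             raise ValueError(f"Unsupported target dataset: {name}")
--         lows.append(low)
--     # candidate-driven: for each supported dataset other than the base, keep it
--     # if it occurs, then order the survivors by where they first appear.
--     present = [d for d in SUPPORTED_DATASETS if d != base and d in lows]
--     return sorted(present, key=lows.index)
-- ===== Notes on version B (the rewrite author's own statement) =====
-- stated objective: alternative
-- what changed: A scans the source once with a mutable seen-set appending new names; B is candidate-driven: it lowercases/validates the names, filters the fixed SUPPORTED_DATASETS tuple for non-base members that occur, and orders them with sorted(key=lows.index) instead of any seen-set dedup scan.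
import Mathlib
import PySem

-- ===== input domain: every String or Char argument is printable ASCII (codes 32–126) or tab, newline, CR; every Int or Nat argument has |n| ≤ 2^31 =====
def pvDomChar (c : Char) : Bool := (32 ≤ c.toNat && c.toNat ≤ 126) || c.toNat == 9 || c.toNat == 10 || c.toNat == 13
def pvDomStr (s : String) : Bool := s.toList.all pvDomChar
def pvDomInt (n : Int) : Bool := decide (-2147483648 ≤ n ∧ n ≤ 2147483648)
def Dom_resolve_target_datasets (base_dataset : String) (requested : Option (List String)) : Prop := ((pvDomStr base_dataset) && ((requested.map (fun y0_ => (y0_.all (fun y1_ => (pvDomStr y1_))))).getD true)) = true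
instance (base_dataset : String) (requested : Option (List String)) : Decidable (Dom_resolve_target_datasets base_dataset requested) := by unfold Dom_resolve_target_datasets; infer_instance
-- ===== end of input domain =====

-- B replaces A's scan with a seen-set by a candidate-driven algorithm: keep the supported
-- datasets (other than the base) that occur among the lowered names, ordered by their first
-- index in that lowered list (objective: alternative; correct because the output is exactly
-- the distinct supported non-base names in first-occurrence order).

-- SUPPORTED_DATASETS = ("sisfall", "mobiact", "unimib", "kfall")
def pvSup : List String := ["sisfall", "mobiact", "unimib", "kfall"]

-- ===== PORT A =====
-- A's for-loop over `source` with the mutable `seen` set and `targets` list.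
-- On the `raise ValueError` branch (unsupported target) the port returns [] — excluded by Pre_.
def pvALoop (base : String) : List String → PySem.Set String → List String → List String
  | [], _, targets => targets
  | name :: rest, seen, targets =>
    let dataset := PySem.Str.lower name
    if pvSup.contains dataset = false then []
    else if dataset = base || PySem.Set.contains seen dataset then
      pvALoop base rest seen targets
    else
      pvALoop base rest (PySem.Set.add seen dataset) (targets ++ [dataset])

def resolve_target_datasets (base_dataset : String) (requested : Option (List String)) : List String :=
  let base := PySem.Str.lower base_dataset
  if pvSup.contains base = false then []   -- raise ValueError: excluded by Pre_
  else
    let source : List String := match requested with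
      | some l => if l = [] then pvSup else l
      | none => pvSup
    pvALoop base source PySem.Set.empty []

-- ===== PORT B =====
-- B's validation loop building `lows`; none = raise ValueError at the first offender.
def pvBLows : List String → Option (List String)
  | [] => some []
  | name :: rest =>
    let low := PySem.Str.lower name
    if pvSup.contains low = false then none
    else (pvBLows rest).map (fun t => low :: t)

def resolve_target_datasets_alt (base_dataset : String) (requested : Option (List String)) : List String :=
  let base := PySem.Str.lower base_dataset
  if pvSup.contains base = false then []   -- raise ValueError: excluded by Pre_
  else
    let source : List String := match requested with
      | some l => if l = [] then pvSup else l
      | none => pvSup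
    match pvBLows source with
    | none => []   -- raise ValueError: excluded by Pre_
    | some lows =>
      let present := pvSup.filter (fun d => d != base && lows.contains d)
      -- key = lows.index; exact because every d in `present` is a member of `lows`
      PySem.List.sorted present (fun d => (PySem.List.index? lows d).getD 0) false

-- ===== PRECONDITION & SPEC =====
-- the `source` A iterates over (requested, or SUPPORTED_DATASETS when requested is falsy)
def pvPreSrc (requested : Option (List String)) : List String :=
  match requested with
  | some l => if l = [] then pvSup else l
  | none => pvSup

-- Pre_ excludes exactly the inputs on which the Python A raises ValueError
-- (base or some requested name not a supported dataset after lowercasing).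
def Pre_resolve_target_datasets (base_dataset : String) (requested : Option (List String)) : Prop :=
  pvSup.contains (PySem.Str.lower base_dataset) = true ∧
  ∀ n ∈ pvPreSrc requested, pvSup.contains (PySem.Str.lower n) = true
instance (base_dataset : String) (requested : Option (List String)) : Decidable (Pre_resolve_target_datasets base_dataset requested) := by unfold Pre_resolve_target_datasets; infer_instance

def pvWitness_resolve_target_datasets : String × Option (List String) :=
  ("sisfall", some ["MobiAct", "kfall", "mobiact", "sisfall"])

def Spec_resolve_target_datasets (base_dataset : String) (requested : Option (List String)) (out : List String) : Prop := out = resolve_target_datasets_alt base_dataset requested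
instance (base_dataset : String) (requested : Option (List String)) (out : List String) : Decidable (Spec_resolve_target_datasets base_dataset requested out) := by unfold Spec_resolve_target_datasets; infer_instance

-- ===== CLAIM (what is proved, stated in full; the proofs are below) =====
def Claim_equal_resolve_target_datasets : Prop := ∀ (base_dataset : String) (requested : Option (List String)), Dom_resolve_target_datasets base_dataset requested → Pre_resolve_target_datasets base_dataset requested → Spec_resolve_target_datasets base_dataset requested (resolve_target_datasets base_dataset requested)

-- ===== LEMMAS AND PROOFS =====

-- first-occurrence dedup relative to an already-seen list
def pvDD (s : List String) : List String → List String
  | [] => []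
  | d :: t => if d ∈ s then pvDD s t else d :: pvDD (s ++ [d]) t

theorem pvSet_foldl_add (ks : List String) : ∀ s : List String,
    ks.foldl PySem.Set.add s = s ++ pvDD s ks := by
  induction ks with
  | nil => intro s; simp [pvDD]
  | cons d t ih =>
    intro s
    simp only [List.foldl, pvDD, PySem.Set.add, PySem.Set.contains, List.contains_eq_mem,
      decide_eq_true_eq]
    by_cases h : d ∈ s
    · simp [h, ih s]
    · simp [h, ih (s ++ [d])]

theorem pvDD_not_mem_seen : ∀ (t s : List String) (a : String), a ∈ pvDD s t → a ∉ s := by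
  intro t
  induction t with
  | nil => intro s a h; simp [pvDD] at h
  | cons d t ih =>
    intro s a h
    simp only [pvDD] at h
    by_cases hd : d ∈ s
    · exact ih s a (by simpa [hd] using h)
    · simp only [hd, if_neg, not_false_iff, List.mem_cons] at h
      rcases h with rfl | h
      · exact hd
      · have := ih (s ++ [d]) a h
        intro hs; exact this (by simp [hs])

theorem pvDD_congr : ∀ (t s₁ s₂ : List String), (∀ x, x ∈ s₁ ↔ x ∈ s₂) →
    pvDD s₁ t = pvDD s₂ t := by
  intro t
  induction t with
  | nil => intro _ _ _; rfl
  | cons d t ih =>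
    intro s₁ s₂ h
    simp only [pvDD]
    by_cases hd : d ∈ s₂
    · simp only [(h d).mpr hd, hd, if_pos]; exact ih s₁ s₂ h
    · have h1 : d ∉ s₁ := fun hm => hd ((h d).mp hm)
      simp only [h1, hd, if_neg, not_false_iff]
      exact congrArg (d :: ·) (ih (s₁ ++ [d]) (s₂ ++ [d]) (by intro x; simp [h x]))

theorem pvDD_seen_snoc : ∀ (t s : List String) (x : String),
    pvDD (s ++ [x]) t = (pvDD s t).filter (fun a => a != x) := by
  intro t
  induction t with
  | nil => intro s x; rfl
  | cons d t ih =>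
    intro s x
    simp only [pvDD]
    by_cases hds : d ∈ s
    · simp only [List.mem_append, hds, true_or, if_pos]; exact ih s x
    · by_cases hdx : d = x
      · subst hdx
        simp only [List.mem_append, List.mem_singleton, or_true, if_pos, hds, if_neg,
          not_false_iff, List.filter_cons, bne_self_eq_false, Bool.false_eq_true]
        have : ∀ a ∈ pvDD (s ++ [d]) t, (a != d) = true := by
          intro a ha
          have := pvDD_not_mem_seen t (s ++ [d]) a ha
          simp only [List.mem_append, List.mem_singleton, not_or] at this
          simp [this.2]
        exact (List.filter_eq_self.mpr this).symm
      · have hnd : d ∉ s ++ [x] := by simp [hds, hdx]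
        simp only [hnd, hds, if_neg, not_false_iff, List.filter_cons]
        have hb : (d != x) = true := by simp [hdx]
        simp only [hb, if_pos]
        refine congrArg (d :: ·) ?_
        rw [pvDD_congr t (s ++ [x] ++ [d]) (s ++ [d] ++ [x]) (by intro y; simp; tauto)]
        exact ih (s ++ [d]) x

theorem pvDedup_eq_pvDD (L : List String) : PySem.List.dedup L = pvDD [] L := by
  rw [PySem.List.dedup_eq_ofList, PySem.Set.ofList_eq_foldl, pvSet_foldl_add L []]
  simp

theorem pvDedup_cons (x : String) (t : List String) :
    PySem.List.dedup (x :: t) = x :: (PySem.List.dedup t).filter (fun a => a != x) := by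
  rw [pvDedup_eq_pvDD, pvDedup_eq_pvDD]
  simp only [pvDD, List.not_mem_nil, if_neg, not_false_iff]
  exact congrArg (x :: ·) (by simpa using pvDD_seen_snoc t [] x)

-- the sort key: lows.index d (total form; exact on members of L)
def pvKey (L : List String) (d : String) : Nat := (PySem.List.index? L d).getD 0

theorem pvKey_cons_self (x : String) (t : List String) : pvKey (x :: t) x = 0 := by
  unfold pvKey; rw [PySem.List.index?_cons_self]; rfl

theorem pvKey_cons_ne (x a : String) (t : List String) (hne : x ≠ a) (ha : a ∈ t) :
    pvKey (x :: t) a = pvKey t a + 1 := by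
  have h := PySem.List.index?_cons_of_ne (xs := t) hne
  have hs : (PySem.List.index? t a).isSome := (PySem.List.index?_isSome_iff t a).mpr ha
  obtain ⟨k, hk⟩ := Option.isSome_iff_exists.mp hs
  unfold pvKey; rw [h, hk]; rfl

theorem pvDedup_pairwise_key (L : List String) :
    (PySem.List.dedup L).Pairwise (fun a b => pvKey L a < pvKey L b) := by
  induction L with
  | nil => rw [pvDedup_eq_pvDD]; exact List.Pairwise.nil
  | cons x t ih =>
    rw [pvDedup_cons]
    constructor
    · intro b hb
      have hbd := List.mem_of_mem_filter hb
      have hbx : b ≠ x := by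
        have := List.of_mem_filter hb; simpa using this
      have hbt : b ∈ t := (PySem.List.mem_dedup _ _).mp hbd
      rw [pvKey_cons_self, pvKey_cons_ne x b t (fun h => hbx h.symm) hbt]
      omega
    · have hpw : ((PySem.List.dedup t).filter (fun a => a != x)).Pairwise
          (fun a b => pvKey t a < pvKey t b) :=
        ih.sublist (List.filter_sublist)
      refine hpw.imp_of_mem ?_
      intro a b ha hb h
      have hax : a ≠ x := by have := List.of_mem_filter ha; simpa using this
      have hbx : b ≠ x := by have := List.of_mem_filter hb; simpa using this
      have hat : a ∈ t := (PySem.List.mem_dedup _ _).mp (List.mem_of_mem_filter ha)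
      have hbt : b ∈ t := (PySem.List.mem_dedup _ _).mp (List.mem_of_mem_filter hb)
      rw [pvKey_cons_ne x a t (fun h => hax h.symm) hat,
        pvKey_cons_ne x b t (fun h => hbx h.symm) hbt]
      omega

theorem pvDD_filter_congr (base : String) : ∀ (t s₁ s₂ : List String),
    (∀ x, x ≠ base → (x ∈ s₁ ↔ x ∈ s₂)) →
    (pvDD s₁ t).filter (fun d => d != base) = (pvDD s₂ t).filter (fun d => d != base) := by
  intro t
  induction t with
  | nil => intro s₁ s₂ _; simp [pvDD]
  | cons d t ih =>
    intro s₁ s₂ h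
    have hext : ∀ y : String, ∀ x, x ≠ base → (x ∈ s₁ ++ [y] ↔ x ∈ s₂ ++ [y]) := by
      intro y x hx; simp [h x hx]
    by_cases hdb : d = base
    · subst hdb
      have h1 : ∀ x, x ≠ d → (x ∈ s₁ ++ [d] ↔ x ∈ s₂) := by
        intro x hx; simp [h x hx, hx]
      have h2 : ∀ x, x ≠ d → (x ∈ s₁ ↔ x ∈ s₂ ++ [d]) := by
        intro x hx; simp [h x hx, hx]
      simp only [pvDD]
      by_cases c1 : d ∈ s₁ <;> by_cases c2 : d ∈ s₂ <;>
        simp only [c1, c2, if_pos, if_neg, not_false_iff, List.filter_cons,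
          bne_self_eq_false, Bool.false_eq_true]
      · exact ih s₁ s₂ h
      · exact ih s₁ (s₂ ++ [d]) h2
      · exact ih (s₁ ++ [d]) s₂ h1
      · exact ih (s₁ ++ [d]) (s₂ ++ [d]) (hext d)
    · have hc : d ∈ s₁ ↔ d ∈ s₂ := h d hdb
      simp only [pvDD]
      by_cases c2 : d ∈ s₂
      · simp only [hc.mpr c2, c2, if_pos]; exact ih s₁ s₂ h
      · have c1 : d ∉ s₁ := fun hm => c2 (hc.mp hm)
        simp only [c1, c2, if_neg, not_false_iff, List.filter_cons]
        have hb : (d != base) = true := by simp [hdb]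
        simp only [hb, if_pos]
        exact congrArg (d :: ·) (ih (s₁ ++ [d]) (s₂ ++ [d]) (hext d))

theorem pvALoop_spec (base : String) : ∀ (l : List String) (s targets : List String),
    (∀ n ∈ l, pvSup.contains (PySem.Str.lower n) = true) →
    pvALoop base l s targets =
      targets ++ (pvDD s (l.map (fun n => PySem.Str.lower n))).filter (fun d => d != base) := by
  intro l
  induction l with
  | nil => intro s targets _; simp [pvALoop, pvDD]
  | cons name rest ih =>
    intro s targets hsup
    have hn : pvSup.contains (PySem.Str.lower name) = true := hsup name (by simp)
    have hrest : ∀ n ∈ rest, pvSup.contains (PySem.Str.lower n) = true := by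
      intro n hm; exact hsup n (by simp [hm])
    simp only [pvALoop, hn, Bool.true_eq_false, if_false, List.map_cons, pvDD,
      PySem.Set.contains, PySem.Set.add, List.contains_eq_mem]
    set d := PySem.Str.lower name with hd
    by_cases hdb : d = base
    · subst hdb
      simp only [decide_true, Bool.true_or, if_pos]
      rw [ih s targets hrest]
      by_cases hc : d ∈ s
      · simp [hc]
      · simp only [hc, if_neg, not_false_iff, List.filter_cons, bne_self_eq_false,
          Bool.false_eq_true]
        exact congrArg (targets ++ ·)
          (pvDD_filter_congr d (rest.map (fun n => PySem.Str.lower n)) s (s ++ [d])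
            (by intro x hx; simp [hx]))
    · by_cases hc : d ∈ s
      · rw [if_pos (by simp [hc]), ih s targets hrest, if_pos hc]
      · rw [if_neg (by simp [hdb, hc]), if_neg (by simp [hc]), if_neg hc,
          ih (s ++ [d]) (targets ++ [d]) hrest, List.filter_cons]
        have hb : (d != base) = true := by simp [hdb]
        rw [if_pos hb]
        simp

theorem pvBLows_eq (src : List String)
    (hsrc : ∀ n ∈ src, pvSup.contains (PySem.Str.lower n) = true) :
    pvBLows src = some (src.map (fun n => PySem.Str.lower n)) := by
  induction src with
  | nil => rfl
  | cons name rest ih =>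
    have hn : pvSup.contains (PySem.Str.lower name) = true := hsrc name (by simp)
    have hrest : ∀ n ∈ rest, pvSup.contains (PySem.Str.lower n) = true := by
      intro n hm; exact hsrc n (by simp [hm])
    have hn' : PySem.Str.lower name ∈ pvSup := by simpa [List.contains_eq_mem] using hn
    simp [pvBLows, hn', ih hrest]

-- the heart of the equivalence: first-occurrence dedup minus the base equals the supported
-- candidates (minus the base) that occur in L, sorted by first index in L
theorem pvMain (base : String) (L : List String) (hL : ∀ x ∈ L, x ∈ pvSup) :
    PySem.List.sorted (pvSup.filter (fun d => d != base && L.contains d))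
      (fun d => (PySem.List.index? L d).getD 0) false =
    (PySem.List.dedup L).filter (fun d => d != base) := by
  apply PySem.List.sorted_eq_of_perm_of_pairwise_lt
  · -- permutation: same elements, both nodup
    have hn1 : ((PySem.List.dedup L).filter (fun d => d != base)).Nodup :=
      (PySem.List.nodup_dedup L).sublist (List.filter_sublist)
    have hn2 : (pvSup.filter (fun d => d != base && L.contains d)).Nodup :=
      (by decide : pvSup.Nodup).sublist (List.filter_sublist)
    refine (List.perm_ext_iff_of_nodup hn1 hn2).mpr ?_
    intro a
    simp only [List.mem_filter, PySem.List.mem_dedup, List.contains_eq_mem, Bool.and_eq_true,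
      bne_iff_ne, ne_eq, decide_eq_true_eq]
    constructor
    · rintro ⟨haL, hab⟩; exact ⟨hL a haL, hab, haL⟩
    · rintro ⟨_, hab, haL⟩; exact ⟨haL, hab⟩
  · -- strictly increasing first-index along the dedup
    exact (pvDedup_pairwise_key L).sublist (List.filter_sublist)

-- ===== VERDICT (by name: the statement is the Claim_ definition above) =====
theorem resolve_target_datasets_spec : Claim_equal_resolve_target_datasets := by
  intro base_dataset requested _ hpre
  obtain ⟨hbase, hsrc⟩ := hpre
  unfold Spec_resolve_target_datasets resolve_target_datasets resolve_target_datasets_alt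
  simp only [hbase, Bool.true_eq_false, if_false]
  have key : ∀ src : List String, (∀ n ∈ src, pvSup.contains (PySem.Str.lower n) = true) →
      pvALoop (PySem.Str.lower base_dataset) src PySem.Set.empty [] =
        (match pvBLows src with
          | none => []
          | some lows =>
            PySem.List.sorted
              (pvSup.filter (fun d => d != PySem.Str.lower base_dataset && lows.contains d))
              (fun d => (PySem.List.index? lows d).getD 0) false) := by
    intro src h
    have hmem : ∀ x ∈ src.map (fun n => PySem.Str.lower n), x ∈ pvSup := by
      intro x hx; simp only [List.mem_map] at hx; obtain ⟨n, hn, rfl⟩ := hx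
      simpa [List.contains_eq_mem] using h n hn
    rw [pvBLows_eq src h, pvALoop_spec _ src PySem.Set.empty [] h,
      show (PySem.Set.empty : List String) = [] from rfl, ← pvDedup_eq_pvDD]
    exact (List.nil_append _).trans (pvMain _ _ hmem).symm
  cases requested with
  | none => exact key pvSup (by simpa [pvPreSrc] using hsrc)
  | some l =>
    by_cases hl : l = []
    · subst hl
      simpa using key pvSup (by simpa [pvPreSrc] using hsrc)
    · simp only [hl, if_neg, not_false_iff]
      exact key l (by simpa [pvPreSrc, hl] using hsrc)
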